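-- pv_equiv track=rewrite | github.com/Purdue-SoCET/cardinal | gpu/emulator/src/golden_model.py | _classify_range
-- ===== SOURCE A (Python) =====
-- U32_MASK = 0xFFFF_FFFF
--
-- MMIO_START = 0x0000_0000
--
-- MMIO_END = 0x0000_0023  # 36B: 0x00..0x23
--
-- INSTR_START = 0x0000_0024
--
-- INSTR_END = 0x000F_FFFF
--
-- ARGS_START = 0x0010_0000
--
-- ARGS_END = 0x00FF_FFFF
--
-- HEAP_START = 0x1000_0000 # this is where the mem dump should start. If you try to store in another memory space, it will be silently ignored.
--
-- HEAP_END = 0xF0FF_FFFF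
--
-- STACK_START = 0xF100_0000
--
-- STACK_END = 0xFFFF_FFFF
--
-- class MemoryAccessError(RuntimeError):
--     pass
--
-- def _in_range(addr: int, start: int, end: int) -> bool:
--     return start <= addr <= end
--
-- def _classify_range(addr: int, size: int) -> str:
--     """Return the memory space name for a byte access, or raise if unmapped."""
--     a0 = u32(addr)
--     a1 = u32(addr + size - 1)
--     # Require access to stay within one space.
--     for name, lo, hi in (
--         ("mmio", MMIO_START, MMIO_END),
--         ("instr", INSTR_START, INSTR_END),
--         ("args", ARGS_START, ARGS_END),
--         ("heap", HEAP_START, HEAP_END),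
--         ("stack", STACK_START, STACK_END),
--     ):
--         if _in_range(a0, lo, hi) and _in_range(a1, lo, hi):
--             return name
--     raise MemoryAccessError(f"Unmapped memory access: addr={a0:#010x} size={size}")
--
-- def u32(x: int) -> int:
--     return int(x) & U32_MASK
-- ===== SOURCE B (Python) =====
-- U32_MASK = 0xFFFF_FFFF
--
--
-- class MemoryAccessError(RuntimeError):
--     pass
--
--
-- def u32(x: int) -> int:
--     return int(x) & U32_MASK
--
--
-- # The 32-bit address line split into six contiguous segments by these sorted
-- # boundaries; segment i covers [_BOUNDS[i-1], _BOUNDS[i]).  Segment 3 is the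
-- # unmapped gap between args and heap.
-- _BOUNDS = (0x0000_0024, 0x0010_0000, 0x0100_0000, 0x1000_0000, 0xF100_0000)
-- _NAMES = ("mmio", "instr", "args", None, "heap", "stack")
--
--
-- def _segment(a: int) -> int:
--     """Binary search: index of the segment containing a (= #bounds <= a)."""
--     lo, hi = 0, len(_BOUNDS)
--     while lo < hi:
--         mid = (lo + hi) // 2
--         if _BOUNDS[mid] <= a:
--             lo = mid + 1
--         else:
--             hi = mid
--     return lo
--
--
-- def _classify_range(addr: int, size: int) -> str:
--     a0 = u32(addr)
--     a1 = u32(addr + size - 1)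
--     s = _segment(a0)
--     name = _NAMES[s]
--     if name is not None and _segment(a1) == s:
--         return name
--     raise MemoryAccessError(f"Unmapped memory access: addr={a0:#010x} size={size}")
-- ===== Notes on version B (the rewrite author's own statement) =====
-- stated objective: alternative
-- what changed: Replaced the linear scan over five (name,lo,hi) ranges testing both endpoints per range with a sorted boundary table splitting the 32-bit line into six segments, a binary search locating each endpoint's segment index, and a single 'same mapped segment' comparison; the unmapped gap is just the segment whose name is None.
import Mathlib
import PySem

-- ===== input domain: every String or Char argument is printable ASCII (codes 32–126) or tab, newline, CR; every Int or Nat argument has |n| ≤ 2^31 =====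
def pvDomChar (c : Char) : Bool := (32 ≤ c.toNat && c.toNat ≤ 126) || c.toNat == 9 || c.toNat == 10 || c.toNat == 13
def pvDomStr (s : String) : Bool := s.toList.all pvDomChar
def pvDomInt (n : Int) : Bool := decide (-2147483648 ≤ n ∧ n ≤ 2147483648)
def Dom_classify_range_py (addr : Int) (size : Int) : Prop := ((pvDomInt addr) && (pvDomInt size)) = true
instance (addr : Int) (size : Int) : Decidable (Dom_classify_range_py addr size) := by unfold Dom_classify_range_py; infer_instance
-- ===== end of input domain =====

-- B replaces A's five-range scan (both endpoints tested per range) by a sorted boundary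
-- table cutting the 32-bit line into six segments, a binary search for each endpoint's
-- segment, and one 'same mapped segment' comparison (objective: alternative).
-- Where the Python A raises MemoryAccessError, B raises the identical exception; Pre_ excludes exactly those inputs.

-- ===== PORT A =====
-- u32(x) = x & U32_MASK
def pyU32 (x : Int) : Int := PySem.Int.band x 4294967295

-- _in_range(addr, start, end) = start <= addr <= end
def pyInRange (addr start stop : Int) : Bool := decide (start ≤ addr ∧ addr ≤ stop)

-- the for-loop over the literal tuple of (name, lo, hi) ranges; none = fell through to the raise
def pyScan (a0 a1 : Int) : List (String × Int × Int) → Option String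
  | [] => none
  | (name, lo, hi) :: rest =>
      if pyInRange a0 lo hi && pyInRange a1 lo hi then some name else pyScan a0 a1 rest

def classify_range_py (addr : Int) (size : Int) : String :=
  let a0 := pyU32 addr
  let a1 := pyU32 (addr + size - 1)
  -- the raise of MemoryAccessError is outside Pre_; sentinel string stands for it
  (pyScan a0 a1
      [("mmio", 0, 0x23), ("instr", 0x24, 0xFFFFF), ("args", 0x100000, 0xFFFFFF),
       ("heap", 0x10000000, 0xF0FFFFFF), ("stack", 0xF1000000, 0xFFFFFFFF)]).getD
    "MemoryAccessError"

-- ===== PORT B =====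
def altU32 (x : Int) : Int := PySem.Int.band x 4294967295

-- _BOUNDS / _NAMES tables
def altBounds : List Int := [0x24, 0x100000, 0x1000000, 0x10000000, 0xF1000000]
def altNames : List (Option String) :=
  [some "mmio", some "instr", some "args", none, some "heap", some "stack"]

-- the while-loop of _segment, on the interval [lo, hi)
def altSegLoop (a : Int) (lo hi : Nat) : Nat :=
  if lo < hi then
    let mid := (lo + hi) / 2
    if altBounds.getD mid 0 ≤ a then altSegLoop a (mid + 1) hi
    else altSegLoop a lo mid
  else lo
termination_by hi - lo
decreasing_by all_goals omega

-- _segment(a)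
def altSegment (a : Int) : Nat := altSegLoop a 0 altBounds.length

def classify_range_py_alt (addr : Int) (size : Int) : String :=
  let a0 := altU32 addr
  let a1 := altU32 (addr + size - 1)
  let s := altSegment a0
  -- name is not None and _segment(a1) == s; the raise is the sentinel string
  match altNames.getD s none with
  | some name => if altSegment a1 = s then name else "MemoryAccessError"
  | none => "MemoryAccessError"

-- ===== PRECONDITION & SPEC =====
-- Pre_: the inputs on which the Python A returns normally — both u32 endpoints lie in one memory space;
-- on all other inputs A raises MemoryAccessError (and B raises the identical exception).
def Pre_classify_range_py (addr : Int) (size : Int) : Prop :=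
  let a0 := PySem.Int.mod addr 4294967296
  let a1 := PySem.Int.mod (addr + size - 1) 4294967296
  (a0 ≤ 0x23 ∧ a1 ≤ 0x23) ∨
  (0x24 ≤ a0 ∧ a0 ≤ 0xFFFFF ∧ 0x24 ≤ a1 ∧ a1 ≤ 0xFFFFF) ∨
  (0x100000 ≤ a0 ∧ a0 ≤ 0xFFFFFF ∧ 0x100000 ≤ a1 ∧ a1 ≤ 0xFFFFFF) ∨
  (0x10000000 ≤ a0 ∧ a0 ≤ 0xF0FFFFFF ∧ 0x10000000 ≤ a1 ∧ a1 ≤ 0xF0FFFFFF) ∨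
  (0xF1000000 ≤ a0 ∧ 0xF1000000 ≤ a1)
instance (addr : Int) (size : Int) : Decidable (Pre_classify_range_py addr size) := by
  unfold Pre_classify_range_py; infer_instance

def pvWitness_classify_range_py : Int × Int := (4, 4)

def Spec_classify_range_py (addr : Int) (size : Int) (out : String) : Prop := out = classify_range_py_alt addr size
instance (addr : Int) (size : Int) (out : String) : Decidable (Spec_classify_range_py addr size out) := by unfold Spec_classify_range_py; infer_instance

-- ===== CLAIM =====
def Claim_equal_classify_range_py : Prop := ∀ (addr : Int) (size : Int), Dom_classify_range_py addr size → Pre_classify_range_py addr size → Spec_classify_range_py addr size (classify_range_py addr size)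

-- ===== LEMMAS AND PROOFS =====

-- Python's x & 0xFFFFFFFF equals x mod 2^32 for every int x
theorem band_mask_eq_mod (x : Int) :
    PySem.Int.band x 4294967295 = PySem.Int.mod x 4294967296 := by
  have hmod : PySem.Int.mod x 4294967296 = x % 4294967296 :=
    PySem.Int.mod_eq_emod_of_pos (by norm_num)
  rw [hmod]
  unfold PySem.Int.band
  split_ifs with h h2 h2
  · have h1 : x.toNat &&& (4294967295 : Int).toNat = x.toNat % 4294967296 := by
      have := Nat.and_two_pow_sub_one_eq_mod x.toNat 32
      norm_num at this; exact this
    rw [h1]; omega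
  · norm_num at h2
  · set m := (-x - 1).toNat with hm
    have h1 : m &&& (2 ^ 32 - 1) = m % 2 ^ 32 := Nat.and_two_pow_sub_one_eq_mod m 32
    norm_num at h1
    have h2 : (4294967295 : Int).toNat = 4294967295 := by simp
    rw [h2, Nat.and_comm, h1]; omega
  · norm_num at h2

-- the binary search, fully unfolded on the concrete 5-entry table
theorem altSegment_eq (a : Int) :
    altSegment a =
      if a < 0x24 then 0 else if a < 0x100000 then 1 else if a < 0x1000000 then 2
      else if a < 0x10000000 then 3 else if a < 0xF1000000 then 4 else 5 := by
  have l0 : ∀ n, altSegLoop a n n = n := fun n => by rw [altSegLoop]; simp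
  have h01 : altSegLoop a 0 1 = if 0x24 ≤ a then 1 else 0 := by
    rw [altSegLoop]; norm_num [altBounds, l0]
  have h34 : altSegLoop a 3 4 = if 0x10000000 ≤ a then 4 else 3 := by
    rw [altSegLoop]; norm_num [altBounds, l0]
  have h02 : altSegLoop a 0 2 = if 0x100000 ≤ a then 2 else if 0x24 ≤ a then 1 else 0 := by
    rw [altSegLoop]; norm_num [altBounds, l0, h01]
  have h35 : altSegLoop a 3 5 = if 0xF1000000 ≤ a then 5 else if 0x10000000 ≤ a then 4 else 3 := by
    rw [altSegLoop]; norm_num [altBounds, l0, h34]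
  have h05 : altSegLoop a 0 5 = if 0x1000000 ≤ a then altSegLoop a 3 5 else altSegLoop a 0 2 := by
    rw [altSegLoop]; norm_num [altBounds]
  have hlen : altSegment a = altSegLoop a 0 5 := rfl
  rw [hlen, h05, h35, h02]
  split_ifs <;> omega

theorem classify_range_py_spec : Claim_equal_classify_range_py := by
  intro addr size _ hpre
  unfold Spec_classify_range_py classify_range_py classify_range_py_alt pyU32 altU32
  rw [band_mask_eq_mod, band_mask_eq_mod]
  unfold Pre_classify_range_py at hpre
  set a0 := PySem.Int.mod addr 4294967296 with ha0
  set a1 := PySem.Int.mod (addr + size - 1) 4294967296 with ha1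
  have hn0 : 0 ≤ a0 := by rw [ha0]; exact PySem.Int.mod_nonneg _ (by norm_num)
  have hn1 : 0 ≤ a1 := by rw [ha1]; exact PySem.Int.mod_nonneg _ (by norm_num)
  have hb0 : a0 < 4294967296 := by rw [ha0]; exact PySem.Int.mod_lt _ (by norm_num)
  have hb1 : a1 < 4294967296 := by rw [ha1]; exact PySem.Int.mod_lt _ (by norm_num)
  clear ha0 ha1
  rcases hpre with ⟨h1, h2⟩ | ⟨h1, h2, h3, h4⟩ | ⟨h1, h2, h3, h4⟩ | ⟨h1, h2, h3, h4⟩ | ⟨h1, h2⟩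
  · have s0 : altSegment a0 = 0 := by rw [altSegment_eq]; split_ifs <;> omega
    have s1 : altSegment a1 = 0 := by rw [altSegment_eq]; split_ifs <;> omega
    simp only [pyScan, pyInRange, s0, s1, altNames, Bool.and_eq_true, decide_eq_true_eq]
    rw [if_pos (by omega : ((0 ≤ a0 ∧ a0 ≤ 35) ∧ 0 ≤ a1 ∧ a1 ≤ 35))]
    simp [List.getD]
  · have s0 : altSegment a0 = 1 := by rw [altSegment_eq]; split_ifs <;> omega
    have s1 : altSegment a1 = 1 := by rw [altSegment_eq]; split_ifs <;> omega
    simp only [pyScan, pyInRange, s0, s1, altNames, Bool.and_eq_true, decide_eq_true_eq]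
    rw [if_neg (by omega), if_pos (by omega : ((36 ≤ a0 ∧ a0 ≤ 1048575) ∧ 36 ≤ a1 ∧ a1 ≤ 1048575))]
    simp [List.getD]
  · have s0 : altSegment a0 = 2 := by rw [altSegment_eq]; split_ifs <;> omega
    have s1 : altSegment a1 = 2 := by rw [altSegment_eq]; split_ifs <;> omega
    simp only [pyScan, pyInRange, s0, s1, altNames, Bool.and_eq_true, decide_eq_true_eq]
    rw [if_neg (by omega), if_neg (by omega),
        if_pos (by omega : ((1048576 ≤ a0 ∧ a0 ≤ 16777215) ∧ 1048576 ≤ a1 ∧ a1 ≤ 16777215))]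
    simp [List.getD]
  · have s0 : altSegment a0 = 4 := by rw [altSegment_eq]; split_ifs <;> omega
    have s1 : altSegment a1 = 4 := by rw [altSegment_eq]; split_ifs <;> omega
    simp only [pyScan, pyInRange, s0, s1, altNames, Bool.and_eq_true, decide_eq_true_eq]
    rw [if_neg (by omega), if_neg (by omega), if_neg (by omega),
        if_pos (by omega : ((268435456 ≤ a0 ∧ a0 ≤ 4043309055) ∧ 268435456 ≤ a1 ∧ a1 ≤ 4043309055))]
    simp [List.getD]
  · have s0 : altSegment a0 = 5 := by rw [altSegment_eq]; split_ifs <;> omega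
    have s1 : altSegment a1 = 5 := by rw [altSegment_eq]; split_ifs <;> omega
    simp only [pyScan, pyInRange, s0, s1, altNames, Bool.and_eq_true, decide_eq_true_eq]
    rw [if_neg (by omega), if_neg (by omega), if_neg (by omega), if_neg (by omega),
        if_pos (by omega : ((4043309056 ≤ a0 ∧ a0 ≤ 4294967295) ∧ 4043309056 ≤ a1 ∧ a1 ≤ 4294967295))]
    simp [List.getD]
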